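-- pv_equiv track=rewrite | github.com/D-Neumayer/Python | CS-50/plates/plates.py | betw_26
-- ===== SOURCE A (Python) =====
-- def betw_26(s):
--     char = 0
--     for i in s:
--         char += 1
--     if 2 <= char <= 6:
--         return False
--     else:
--         return True
-- ===== SOURCE B (Python) =====
-- def betw_26(s):
--     return not (2 <= len(s) <= 6)
-- ===== Notes on version B (the rewrite author's own statement) =====
-- stated objective: faster
-- what changed: Replace the manual counting loop with Python's O(1) len() and return the negated 2..6 range test directly.
import Mathlib
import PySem

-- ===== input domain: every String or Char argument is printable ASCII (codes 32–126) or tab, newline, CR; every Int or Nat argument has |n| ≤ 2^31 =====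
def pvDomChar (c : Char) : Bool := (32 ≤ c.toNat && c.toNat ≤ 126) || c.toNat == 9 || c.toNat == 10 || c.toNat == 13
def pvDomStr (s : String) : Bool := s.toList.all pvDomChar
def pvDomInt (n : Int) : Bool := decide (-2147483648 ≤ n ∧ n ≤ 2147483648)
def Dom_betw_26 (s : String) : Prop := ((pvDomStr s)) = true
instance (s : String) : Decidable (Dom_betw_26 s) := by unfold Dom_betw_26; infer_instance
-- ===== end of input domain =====

-- B replaces A's character-counting loop with a direct length lookup and a negated range test (idiomatic).

-- ===== PORT A =====
-- A counts the characters with a loop accumulator, then tests 2 <= char <= 6.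
def betw_26 (s : String) : Bool :=
  let char : Int := s.toList.foldl (fun acc _ => acc + 1) 0
  if 2 ≤ char ∧ char ≤ 6 then false else true

-- ===== PORT B =====
-- B: not (2 <= len(s) <= 6), using PySem string length.
def betw_26_alt (s : String) : Bool :=
  !(2 ≤ PySem.Str.len s ∧ PySem.Str.len s ≤ 6 : Bool)

-- ===== PRECONDITION & SPEC =====
def Spec_betw_26 (s : String) (out : Bool) : Prop := out = betw_26_alt s
instance (s : String) (out : Bool) : Decidable (Spec_betw_26 s out) := by unfold Spec_betw_26; infer_instance

-- ===== CLAIM (what is proved, stated in full; the proofs are below) =====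
def Claim_equal_betw_26 : Prop := ∀ (s : String), Dom_betw_26 s → Spec_betw_26 s (betw_26 s)

-- ===== LEMMAS AND PROOFS =====
theorem betw_26_count_len (l : List Char) :
    l.foldl (fun (acc : Int) _ => acc + 1) 0 = (l.length : Int) := by
  have h : ∀ (n : Int), l.foldl (fun (acc : Int) _ => acc + 1) n = n + l.length := by
    induction l with
    | nil => simp
    | cons c t ih => intro n; simp [List.foldl, ih]; ring
  simpa using h 0

-- ===== VERDICT (by name: the statement is the Claim_ definition above) =====
theorem betw_26_spec : Claim_equal_betw_26 := by
  intro s _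
  unfold Spec_betw_26 betw_26 betw_26_alt
  simp only [betw_26_count_len, PySem.Str.len]
  by_cases h : (2 : Int) ≤ s.toList.length ∧ (s.toList.length : Int) ≤ 6 <;>
    simp [h]
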